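-- pv_equiv track=rewrite | github.com/FelixMarin/cine-platform | src/adapters/outgoing/services/omdb/thumbnail_provider.py | _is_similar_title
-- ===== SOURCE A (Python) =====
-- def _is_similar_title(search_norm: str, result_norm: str) -> bool:
--     """
--     Verifica si dos títulos normalizados son similares.
--
--     Considera:
--     - Títulos idénticos
--     - Uno contiene al otro (con límites de palabra) - SOLO para títulos de al menos 2 palabras
--     - Diferencias menores en puntuación
--     """
--     if not search_norm or not result_norm:
--         return False
--
--     # Mismos títulos normalizados
--     if search_norm == result_norm:
--         return True
--
--     # Uno contiene al otro como palabra completa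
--     search_words = set(search_norm.split())
--     result_words = set(result_norm.split())
--
--     # Si son exactamente iguales, ya cubierto
--     if search_words == result_words:
--         return True
--
--     # Si uno es submáscara del otro (palabras completas)
--     search_list = search_norm.split()
--     result_list = result_norm.split()
--
--     # PROTECCIÓN: Para títulos muy cortos (1 palabra), NO permitir submáscara
--     # Esto evita que "Superman" coincida con "Superman Returns"
--     # o que "Man" coincida con "Man of Steel"
--     if len(search_list) <= 1:
--         # Para títulos de una palabra, solo aceptar si son exactamente iguales
--         return search_norm == result_norm
--
--     # Buscar como submáscara (search contenido en result O viceversa)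
--     # SOLO para títulos de 2+ palabras
--     if len(search_list) <= len(result_list):
--         # Buscar si search está contenido en result
--         for i in range(len(result_list) - len(search_list) + 1):
--             if result_list[i:i+len(search_list)] == search_list:
--                 return True
--     else:
--         # Buscar si result está contenido en search
--         for i in range(len(search_list) - len(result_list) + 1):
--             if search_list[i:i+len(result_list)] == result_list:
--                 return True
--
--     return False
-- ===== SOURCE B (Python) =====
-- def _is_similar_title(search_norm: str, result_norm: str) -> bool:
--     if not search_norm or not result_norm:
--         return False
--     search_list = search_norm.split()
--     result_list = result_norm.split()
--     if search_norm == result_norm or set(search_list) == set(result_list):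
--         return True
--     if len(search_list) <= 1:
--         return False
--     if len(search_list) <= len(result_list):
--         shorter, longer = search_list, result_list
--     else:
--         shorter, longer = result_list, search_list
--     padded_short = " " + " ".join(shorter) + " "
--     padded_long = " " + " ".join(longer) + " "
--     return padded_short in padded_long
-- ===== Notes on version B (the rewrite author's own statement) =====
-- stated objective: alternative
-- what changed: Replaces the two index/slice scanning loops over word lists with a word-boundary-padded string representation (' '+' '.join(words)+' ') and a single substring containment test, collapsing the branch on which list is longer into a shorter/longer selection.
-- intended difference: When result_norm is non-empty but all whitespace and search_norm has at least 2 words, A's empty-sublist scan vacuously succeeds and returns True; B returns False, the intended value since a whitespace-only title is not similar to anything. — e.g. on _is_similar_title("a b", " "): A returns true, B returns false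
import Mathlib
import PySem

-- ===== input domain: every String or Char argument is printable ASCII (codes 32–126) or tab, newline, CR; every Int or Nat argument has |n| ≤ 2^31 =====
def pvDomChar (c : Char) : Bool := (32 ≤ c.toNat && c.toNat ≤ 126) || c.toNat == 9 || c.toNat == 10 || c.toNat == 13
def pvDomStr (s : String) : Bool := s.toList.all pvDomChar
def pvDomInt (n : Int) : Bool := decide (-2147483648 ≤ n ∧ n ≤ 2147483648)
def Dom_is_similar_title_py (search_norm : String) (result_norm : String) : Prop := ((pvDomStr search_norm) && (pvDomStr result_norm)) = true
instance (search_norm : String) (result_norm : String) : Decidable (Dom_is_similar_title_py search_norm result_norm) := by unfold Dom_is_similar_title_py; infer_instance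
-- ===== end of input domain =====

-- B replaces A's two index/slice scanning loops by a word-boundary-padded string
-- (' ' + ' '.join(words) + ' ') and a single substring containment test (objective: alternative).

-- ===== PORT A =====
def is_similar_title_py (search_norm : String) (result_norm : String) : Bool :=
  if search_norm == "" || result_norm == "" then false
  else if search_norm == result_norm then true
  else
    let search_words := PySem.Set.ofList (PySem.Str.split₀ search_norm)
    let result_words := PySem.Set.ofList (PySem.Str.split₀ result_norm)
    if PySem.Set.equal search_words result_words then true
    else
      let search_list := PySem.Str.split₀ search_norm
      let result_list := PySem.Str.split₀ result_norm
      if search_list.length ≤ 1 then search_norm == result_norm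
      else if search_list.length ≤ result_list.length then
        (PySem.List.pyRange 0 ((result_list.length : Int) - (search_list.length : Int) + 1) 1).any
          (fun i => PySem.List.slice result_list (some i) (some (i + (search_list.length : Int))) == search_list)
      else
        (PySem.List.pyRange 0 ((search_list.length : Int) - (result_list.length : Int) + 1) 1).any
          (fun i => PySem.List.slice search_list (some i) (some (i + (result_list.length : Int))) == result_list)

-- ===== PORT B =====
def is_similar_title_py_alt (search_norm : String) (result_norm : String) : Bool :=
  if search_norm == "" || result_norm == "" then false
  else
    let search_list := PySem.Str.split₀ search_norm
    let result_list := PySem.Str.split₀ result_norm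
    if search_norm == result_norm
        || PySem.Set.equal (PySem.Set.ofList search_list) (PySem.Set.ofList result_list) then true
    else if search_list.length ≤ 1 then false
    else
      let p := if search_list.length ≤ result_list.length
               then (search_list, result_list) else (result_list, search_list)
      let padded_short := " " ++ PySem.Str.join " " p.1 ++ " "
      let padded_long := " " ++ PySem.Str.join " " p.2 ++ " "
      PySem.Str.isIn padded_short padded_long

-- ===== PRECONDITION & SPEC =====
-- When result_norm is non-empty but all whitespace and search_norm has at least 2 words,
-- A's empty-sublist scan vacuously succeeds and returns True; B returns False, the intended
-- value, since a whitespace-only title is not similar to anything.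
def D_is_similar_title_py (search_norm : String) (result_norm : String) : Prop :=
  search_norm ≠ "" ∧ result_norm ≠ "" ∧ PySem.Str.split₀ result_norm = [] ∧
    2 ≤ (PySem.Str.split₀ search_norm).length
instance (search_norm : String) (result_norm : String) : Decidable (D_is_similar_title_py search_norm result_norm) := by unfold D_is_similar_title_py; infer_instance

def Spec_is_similar_title_py (search_norm : String) (result_norm : String) (out : Bool) : Prop := ¬ D_is_similar_title_py search_norm result_norm → out = is_similar_title_py_alt search_norm result_norm
instance (search_norm : String) (result_norm : String) (out : Bool) : Decidable (Spec_is_similar_title_py search_norm result_norm out) := by unfold Spec_is_similar_title_py; infer_instance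

def pvDiffWitness_is_similar_title_py : String × String := ("a b", " ")
def pvDiffWitnessOut_is_similar_title_py : Bool × Bool := (true, false)

-- ===== CLAIM (what is proved, stated in full; the proofs are below) =====
def Claim_unchanged_is_similar_title_py : Prop := ∀ (search_norm : String) (result_norm : String), Dom_is_similar_title_py search_norm result_norm → Spec_is_similar_title_py search_norm result_norm (is_similar_title_py search_norm result_norm)
def Claim_changed_is_similar_title_py : Prop := Dom_is_similar_title_py (pvDiffWitness_is_similar_title_py.1) (pvDiffWitness_is_similar_title_py.2) ∧ D_is_similar_title_py (pvDiffWitness_is_similar_title_py.1) (pvDiffWitness_is_similar_title_py.2) ∧ is_similar_title_py (pvDiffWitness_is_similar_title_py.1) (pvDiffWitness_is_similar_title_py.2) = pvDiffWitnessOut_is_similar_title_py.1 ∧ is_similar_title_py_alt (pvDiffWitness_is_similar_title_py.1) (pvDiffWitness_is_similar_title_py.2) = pvDiffWitnessOut_is_similar_title_py.2 ∧ pvDiffWitnessOut_is_similar_title_py.1 ≠ pvDiffWitnessOut_is_similar_title_py.2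

def Claim_exact_is_similar_title_py : Prop := ∀ (search_norm : String) (result_norm : String), Dom_is_similar_title_py search_norm result_norm → D_is_similar_title_py search_norm result_norm → is_similar_title_py search_norm result_norm ≠ is_similar_title_py_alt search_norm result_norm

-- ===== LEMMAS AND PROOFS =====

def toks (cur : List Char) : List Char → List (List Char)
  | [] => if cur = [] then [] else [cur]
  | c :: rest =>
      if PySem.Chars.isspace c then
        (if cur = [] then toks [] rest else cur :: toks [] rest)
      else toks (cur ++ [c]) rest

theorem go_eq_toks (s : List Char) : ∀ (cur : List Char) (accl : List (List Char)),
    PySem.Chars.split₀.go s cur accl = accl.reverse ++ toks cur.reverse s := by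
  induction s with
  | nil => intro cur accl; simp [PySem.Chars.split₀.go, toks]; split_ifs with h <;> simp_all
  | cons c rest ih =>
      intro cur accl
      simp only [PySem.Chars.split₀.go, toks]
      split_ifs with h1 h2 h3 h4 <;> simp_all

theorem split₀_eq_toks (s : List Char) : PySem.Chars.split₀ s = toks [] s := by
  simpa using go_eq_toks s [] []

theorem toks_append_space (u : List Char) : ∀ (cur v : List Char),
    toks cur (u ++ ' ' :: v) = toks cur u ++ toks [] v := by
  have hsp : PySem.Chars.isspace ' ' = true := by decide
  induction u with
  | nil => intro cur v; simp [toks, hsp]; split_ifs <;> simp_all [toks]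
  | cons c rest ih =>
      intro cur v
      simp only [List.cons_append, toks]
      split_ifs <;> simp_all [toks]

theorem toks_word (w : List Char) : ∀ (cur : List Char),
    (∀ c ∈ w, PySem.Chars.isspace c = false) →
    toks cur w = if cur ++ w = [] then [] else [cur ++ w] := by
  induction w with
  | nil => intro cur _; simp [toks]
  | cons c rest ih =>
      intro cur h
      have hc : PySem.Chars.isspace c = false := h c (by simp)
      simp only [toks, hc, Bool.false_eq_true, if_false]
      rw [ih (cur ++ [c]) (fun x hx => h x (by simp [hx]))]
      simp

theorem toks_good (s : List Char) : ∀ (cur : List Char),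
    (∀ c ∈ cur, PySem.Chars.isspace c = false) →
    ∀ w ∈ toks cur s, w ≠ [] ∧ ∀ c ∈ w, PySem.Chars.isspace c = false := by
  induction s with
  | nil =>
      intro cur hcur w hw
      simp only [toks] at hw
      split_ifs at hw with h
      · simp at hw
      · simp only [List.mem_singleton] at hw; subst hw; exact ⟨h, hcur⟩
  | cons c rest ih =>
      intro cur hcur w hw
      simp only [toks] at hw
      split_ifs at hw with h1 h2
      · exact ih [] (by simp) w hw
      · rcases List.mem_cons.mp hw with rfl | hw
        · exact ⟨h2, hcur⟩
        · exact ih [] (by simp) w hw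
      · refine ih (cur ++ [c]) ?_ w hw
        intro x hx
        rcases List.mem_append.mp hx with hx | hx
        · exact hcur x hx
        · simp at hx; subst hx; simpa using h1

theorem toks_intercalate : ∀ (ws : List (List Char)),
    (∀ w ∈ ws, w ≠ [] ∧ ∀ c ∈ w, PySem.Chars.isspace c = false) →
    toks [] (List.intercalate [' '] ws) = ws := by
  intro ws
  induction ws with
  | nil => intro _; simp [List.intercalate, toks]
  | cons w rest ih =>
      intro h
      rcases rest with _ | ⟨w2, rest2⟩
      · have := (h w (by simp)).2
        simp [List.intercalate]
        rw [toks_word w [] this]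
        simp [(h w (by simp)).1]
      · have hI : List.intercalate [' '] (w :: w2 :: rest2)
            = w ++ ' ' :: List.intercalate [' '] (w2 :: rest2) := by
          simp [List.intercalate, List.intersperse]
        rw [hI, toks_append_space]
        rw [toks_word w [] (h w (by simp)).2]
        simp [(h w (by simp)).1]
        exact ih (fun x hx => h x (by simp [hx]))

/-- Word-boundary padded form of a word list:  " w1 w2 … wn " as a char list. -/
def pad (ws : List (List Char)) : List Char := ' ' :: List.intercalate [' '] ws ++ [' ']

theorem pad_eq_flat (ws : List (List Char)) (h : ws ≠ []) :
    pad ws = ws.flatMap (fun w => ' ' :: w) ++ [' '] := by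
  unfold pad
  induction ws with
  | nil => simp at h
  | cons w rest ih =>
      rcases rest with _ | ⟨w2, r2⟩
      · simp [List.intercalate]
      · have hI : List.intercalate [' '] (w :: w2 :: r2)
            = w ++ ' ' :: List.intercalate [' '] (w2 :: r2) := by
          simp [List.intercalate, List.intersperse]
        have := ih (by simp)
        simp only [hI, List.flatMap_cons]
        simp_all

theorem pad_infix_of_infix (xs ys : List (List Char)) (hne : xs ≠ []) (h : xs <:+: ys) :
    pad xs <:+: pad ys := by
  obtain ⟨a, b, rfl⟩ := h
  have hys : a ++ xs ++ b ≠ [] := by simp [hne]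
  rw [pad_eq_flat _ hne, pad_eq_flat _ hys]
  rcases b with _ | ⟨w, t⟩
  · exact ⟨a.flatMap (fun w => ' ' :: w), [], by simp⟩
  · refine ⟨a.flatMap (fun w => ' ' :: w), w ++ (t.flatMap (fun w => ' ' :: w)) ++ [' '], ?_⟩
    simp [List.flatMap_append]

theorem infix_of_pad_infix (xs ys : List (List Char))
    (hxs : ∀ w ∈ xs, w ≠ [] ∧ ∀ c ∈ w, PySem.Chars.isspace c = false)
    (hys : ∀ w ∈ ys, w ≠ [] ∧ ∀ c ∈ w, PySem.Chars.isspace c = false)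
    (h : pad xs <:+: pad ys) : xs <:+: ys := by
  obtain ⟨u, v, huv⟩ := h
  have hsp : PySem.Chars.isspace ' ' = true := by decide
  have hy : toks [] (pad ys) = ys := by
    unfold pad
    rw [List.cons_append]
    simp only [toks, hsp, if_true, reduceCtorEq]
    rw [show (List.intercalate [' '] ys ++ [' ']) = (List.intercalate [' '] ys ++ ' ' :: []) from rfl,
        toks_append_space, toks_intercalate ys hys]
    simp [toks]
  have hx : toks [] (u ++ pad xs ++ v) = toks [] u ++ xs ++ toks [] v := by
    have : u ++ pad xs ++ v = u ++ ' ' :: (List.intercalate [' '] xs ++ ' ' :: v) := by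
      simp [pad]
    rw [this, toks_append_space, toks_append_space, toks_intercalate xs hxs]
    simp
  rw [huv] at hx  -- ? huv : u ++ pad xs ++ v = pad ys
  rw [hy] at hx
  exact ⟨toks [] u, toks [] v, hx.symm⟩

theorem map_toList_infix (xs ys : List String) :
    xs.map String.toList <:+: ys.map String.toList ↔ xs <:+: ys := by
  constructor
  · intro h
    obtain ⟨a, b, hab⟩ := h
    obtain ⟨a', r, ha, ha', hr⟩ := List.map_eq_append_iff.mp (hab.symm.trans (List.append_assoc a _ b))
    obtain ⟨x', b', hx, hx', hb'⟩ := List.map_eq_append_iff.mp hr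
    have hinj : Function.Injective String.toList := fun s t h => String.toList_inj.mp h
    exact ⟨a', b', by rw [ha, hx, List.map_injective_iff.mpr hinj hx', List.append_assoc]⟩
  · intro h; exact h.map _

theorem loop_iff (xs l : List String) (hk : xs.length ≤ l.length) :
    ((PySem.List.pyRange 0 ((l.length : Int) - (xs.length : Int) + 1) 1).any
      (fun i => PySem.List.slice l (some i) (some (i + (xs.length : Int))) == xs)) = true
    ↔ xs <:+: l := by
  rw [List.any_eq_true]
  constructor
  · rintro ⟨i, hi, hsl⟩
    rw [PySem.List.mem_pyRange_iff_of_pos (by norm_num)] at hi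
    obtain ⟨h0, hlt, -⟩ := hi
    obtain ⟨m, rfl⟩ := Int.eq_ofNat_of_zero_le h0
    rw [show ((m : Int) + (xs.length : Int)) = ((m + xs.length : Nat) : Int) by push_cast; ring,
        PySem.List.slice_natCast] at hsl
    have := eq_of_beq hsl
    simp only [Nat.add_sub_cancel_left] at this
    have hpre : xs <+: l.drop m := this ▸ List.take_prefix _ _
    exact hpre.isInfix.trans (l.drop_suffix m).isInfix
  · rintro ⟨a, b, rfl⟩
    refine ⟨(a.length : Int), ?_, ?_⟩
    · rw [PySem.List.mem_pyRange_iff_of_pos (by norm_num)]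
      refine ⟨by positivity, by push_cast; simp; omega, by simp⟩
    · rw [show ((a.length : Int) + (xs.length : Int)) = ((a.length + xs.length : Nat) : Int) by push_cast; ring,
          PySem.List.slice_natCast]
      simp [Nat.add_sub_cancel_left, List.drop_append, List.take_left]


theorem pad_toList (ws : List String) :
    (" " ++ PySem.Str.join " " ws ++ " ").toList = pad (ws.map String.toList) := by
  simp [PySem.Str.toList_join, PySem.Chars.join, pad]

theorem contains_eq (xs l : List String) (hxne : xs ≠ [])
    (hx : ∀ w ∈ xs.map String.toList, w ≠ [] ∧ ∀ c ∈ w, PySem.Chars.isspace c = false)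
    (hl : ∀ w ∈ l.map String.toList, w ≠ [] ∧ ∀ c ∈ w, PySem.Chars.isspace c = false)
    (hlen : xs.length ≤ l.length) :
    PySem.Str.isIn (" " ++ PySem.Str.join " " xs ++ " ") (" " ++ PySem.Str.join " " l ++ " ")
      = ((PySem.List.pyRange 0 ((l.length : Int) - (xs.length : Int) + 1) 1).any
          (fun i => PySem.List.slice l (some i) (some (i + (xs.length : Int))) == xs)) := by
  have hpad := pad_toList
  have h1 : PySem.Str.isIn (" " ++ PySem.Str.join " " xs ++ " ")
      (" " ++ PySem.Str.join " " l ++ " ") = true ↔ xs <:+: l := by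
    rw [PySem.Str.isIn_iff_infix, hpad, hpad]
    constructor
    · intro h; exact (map_toList_infix xs l).mp (infix_of_pad_infix _ _ hx hl h)
    · intro h; exact pad_infix_of_infix _ _ (by simpa using hxne) ((map_toList_infix xs l).mpr h)
  exact Bool.eq_iff_iff.mpr (h1.trans (loop_iff xs l hlen).symm)

theorem split₀_words_good (s : String) :
    ∀ w ∈ (PySem.Str.split₀ s).map String.toList,
      w ≠ [] ∧ ∀ c ∈ w, PySem.Chars.isspace c = false := by
  rw [PySem.Str.split₀_map_toList, split₀_eq_toks]
  exact toks_good s.toList [] (by simp)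

def RnoDD : Char → Char → Prop := fun a b => ¬(a = ' ' ∧ b = ' ')

theorem chain_cons_word (x : Char) (w : List Char) (hw : ∀ c ∈ w, c ≠ ' ') :
    List.IsChain RnoDD (x :: w) := by
  induction w generalizing x with
  | nil => exact List.IsChain.singleton x
  | cons c rest ih =>
      exact List.IsChain.cons_cons (fun h => hw c (by simp) h.2)
        (ih c (fun d hd => hw d (by simp [hd])))

theorem word_no_space (w : List Char) (h : ∀ c ∈ w, PySem.Chars.isspace c = false) :
    ∀ c ∈ w, c ≠ ' ' := by
  intro c hc he
  have := h c hc
  rw [he] at this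
  exact absurd this (by decide)

theorem flat_good (ws : List (List Char))
    (h : ∀ w ∈ ws, w ≠ [] ∧ ∀ c ∈ w, PySem.Chars.isspace c = false) : ws ≠ [] →
    List.IsChain RnoDD (ws.flatMap (fun w => ' ' :: w)) ∧
      ∃ c, (ws.flatMap (fun w => ' ' :: w)).getLast? = some c ∧ c ≠ ' ' := by
  induction ws with
  | nil => intro hne; simp at hne
  | cons w rest ih =>
      intro _
      have hw : ∀ c ∈ w, c ≠ ' ' := word_no_space w (h w (by simp)).2
      have hwne : w ≠ [] := (h w (by simp)).1
      obtain ⟨cl, hcl⟩ : ∃ cl, w.getLast? = some cl := by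
        rcases hq : w.getLast? with _ | cl
        · exact absurd (List.getLast?_eq_none_iff.mp hq) hwne
        · exact ⟨cl, rfl⟩
      have hclw : cl ≠ ' ' := hw cl (List.mem_of_getLast? hcl)
      have hlast : (' ' :: w).getLast? = some cl := by
        rw [show (' ' :: w) = [' '] ++ w from rfl, List.getLast?_append_of_ne_nil [' '] hwne, hcl]
      rcases rest with _ | ⟨w2, r2⟩
      · refine ⟨by simpa using chain_cons_word ' ' w hw, cl, by simpa using hlast, hclw⟩
      · have hrest := ih (fun x hx => h x (by simp [hx])) (by simp)
        obtain ⟨hch2, c2, hc2, hc2ne⟩ := hrest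
        constructor
        · rw [List.flatMap_cons]
          refine List.isChain_append.mpr ⟨chain_cons_word ' ' w hw, hch2, ?_⟩
          intro x hx y hy
          rw [hlast] at hx
          simp only [Option.mem_def, Option.some.injEq] at hx
          subst hx
          exact fun hxy => hclw hxy.1
        · refine ⟨c2, ?_, hc2ne⟩
          rw [List.flatMap_cons, List.getLast?_append_of_ne_nil _ (by simp), hc2]

theorem pad_no_dd (ws : List (List Char)) (hne : ws ≠ [])
    (h : ∀ w ∈ ws, w ≠ [] ∧ ∀ c ∈ w, PySem.Chars.isspace c = false) :
    PySem.Chars.isIn [' ', ' '] (pad ws) = false := by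
  rw [PySem.Chars.isIn_eq_false_iff]
  intro hinf
  have hch : List.IsChain RnoDD (pad ws) := by
    rw [pad_eq_flat ws hne]
    obtain ⟨h1, c, hc, hcne⟩ := flat_good ws h hne
    refine List.isChain_append.mpr ⟨h1, List.IsChain.singleton _, ?_⟩
    intro x hx y hy
    rw [hc] at hx
    simp only [Option.mem_def, Option.some.injEq] at hx
    subst hx
    exact fun hxy => hcne hxy.1
  obtain ⟨u, v, huv⟩ := hinf
  rw [← huv] at hch
  have hmid := (List.isChain_append.mp (List.isChain_append.mp hch).1).2.1
  rcases hmid with _ | _ | ⟨hR, -⟩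
  exact hR ⟨rfl, rfl⟩

-- ===== VERDICT (by name: the statement is the Claim_ definition above) =====
theorem is_similar_title_py_spec : Claim_unchanged_is_similar_title_py := by
  intro s r _ hnD
  unfold is_similar_title_py is_similar_title_py_alt
  by_cases hg : (s == "" || r == "") = true
  · simp [hg]
  · simp only [hg, Bool.false_eq_true, if_false]
    by_cases heq : (s == r) = true
    · simp [heq]
    · simp only [heq, Bool.false_eq_true, if_false, Bool.false_or]
      by_cases hset : PySem.Set.equal (PySem.Set.ofList (PySem.Str.split₀ s))
          (PySem.Set.ofList (PySem.Str.split₀ r)) = true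
      · simp [hset]
      · simp only [hset, Bool.false_eq_true, if_false]
        by_cases hlen : (PySem.Str.split₀ s).length ≤ 1
        · simp [hlen, heq]
        · have h2 : 2 ≤ (PySem.Str.split₀ s).length := by omega
          simp only [hlen, if_false]
          by_cases hc : (PySem.Str.split₀ s).length ≤ (PySem.Str.split₀ r).length
          · simp only [hc, if_true]
            exact (contains_eq _ _ (by intro h; simp [h] at h2) (split₀_words_good s)
              (split₀_words_good r) hc).symm
          · simp only [hc, if_false]
            have hrne : PySem.Str.split₀ r ≠ [] := by
              intro hr
              apply hnD
              refine ⟨by simpa using fun h => hg (by simp [h]), by simpa using fun h => hg (by simp [h]), hr, h2⟩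
            exact (contains_eq _ _ hrne (split₀_words_good r) (split₀_words_good s) (by omega)).symm

theorem is_similar_title_py_changed : Claim_changed_is_similar_title_py := by
  unfold Claim_changed_is_similar_title_py; decide

theorem is_similar_title_py_tight : Claim_exact_is_similar_title_py := by
  intro s r _ hD
  obtain ⟨hs, hr, hrl, h2⟩ := hD
  have hsl : PySem.Str.split₀ s ≠ [] := by intro h; rw [h] at h2; simp at h2
  have hsr : s ≠ r := by
    intro e; rw [e, hrl] at h2; simp at h2
  have hg : (s == "" || r == "") = false := by simp [hs, hr]
  have heq : (s == r) = false := by simp [hsr]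
  have hset : PySem.Set.equal (PySem.Set.ofList (PySem.Str.split₀ s))
      (PySem.Set.ofList (PySem.Str.split₀ r)) = false := by
    rw [Bool.eq_false_iff]
    intro habs
    obtain ⟨w, hw⟩ := List.exists_mem_of_ne_nil _ hsl
    have := (PySem.Set.equal_iff _ _).mp habs w
    rw [hrl] at this
    have hmem : w ∈ PySem.Set.ofList (PySem.Str.split₀ s) := by
      rw [PySem.Set.mem_ofList]; exact hw
    rw [this] at hmem
    rw [PySem.Set.mem_ofList] at hmem
    simp at hmem
  have hlen : ¬ ((PySem.Str.split₀ s).length ≤ 1) := by omega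
  have hc : ¬ ((PySem.Str.split₀ s).length ≤ (PySem.Str.split₀ r).length) := by
    rw [hrl]; simp; omega
  have hA : is_similar_title_py s r = true := by
    unfold is_similar_title_py
    simp only [hg, Bool.false_eq_true, if_false, heq, hset, hlen, hc, if_true]
    rw [List.any_eq_true]
    refine ⟨0, ?_, ?_⟩
    · rw [PySem.List.mem_pyRange_iff_of_pos (by norm_num)]
      rw [hrl]
      refine ⟨le_refl 0, by simp, by simp⟩
    · rw [hrl]
      simp [PySem.List.slice, PySem.List.clampIdx]
  have hB : is_similar_title_py_alt s r = false := by
    unfold is_similar_title_py_alt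
    simp only [hg, Bool.false_eq_true, if_false, heq, hset, Bool.or_self, hlen, hc, if_true,
      Bool.false_or, if_neg]
    rw [PySem.Str.isIn_eq]
    rw [hrl, pad_toList, pad_toList]
    have : pad (([] : List String).map String.toList) = [' ', ' '] := by
      simp [pad, List.intercalate]
    rw [this]
    exact pad_no_dd _ (fun h => hsl (List.map_eq_nil_iff.mp h)) (split₀_words_good s)
  rw [hA, hB]
  simp
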